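-- pv_equiv track=rewrite | github.com/diegoasanch/Programacion-I-Trabajos-Practicos | TP3 Matrices/crear_matrices.py | trianInferiorInv
-- ===== SOURCE A (Python) =====
-- matrizCuad = lambda orden, filler=0: [[filler]*orden for i in range(orden)]
--
-- def trianInferiorInv(n=4):
--     'Crea una matriz triangular inferior inversa con secuencia de numeros'
--
--     matriz = matrizCuad(n)
--     sec = 1
--     col = n - 1
--     for i in range(n):
--         for j in range(n-1, -1, -1):
--             if j >= col:
--                 matriz[i][j] = sec
--                 sec += 1
--         col -= 1
--     return matriz
-- ===== SOURCE B (Python) =====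
-- def trianInferiorInv(n=4):
--     'Crea una matriz triangular inferior inversa con secuencia de numeros'
--     return [[i*(i+1)//2 + n - j if j >= n-1-i else 0 for j in range(n)]
--             for i in range(n)]
-- ===== Notes on version B (the rewrite author's own statement) =====
-- stated objective: simpler
-- what changed: Replaces the in-place matrix mutation with a running sec counter and col bound by a nested comprehension computing each cell from its position by the closed form i*(i+1)//2 + n - j.
import Mathlib
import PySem

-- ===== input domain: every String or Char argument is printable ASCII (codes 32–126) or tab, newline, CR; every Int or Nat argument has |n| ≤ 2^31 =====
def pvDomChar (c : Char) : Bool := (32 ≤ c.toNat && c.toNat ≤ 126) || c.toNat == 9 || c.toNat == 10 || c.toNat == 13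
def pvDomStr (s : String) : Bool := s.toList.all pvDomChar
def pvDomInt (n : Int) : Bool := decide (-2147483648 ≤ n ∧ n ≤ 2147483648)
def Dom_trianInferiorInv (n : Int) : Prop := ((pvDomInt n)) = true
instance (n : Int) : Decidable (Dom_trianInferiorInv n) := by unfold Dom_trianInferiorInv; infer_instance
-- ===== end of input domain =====

-- B replaces A's in-place fill driven by a running sec counter and col bound with a nested
-- comprehension computing each cell from its position by closed form (objective: simpler).

-- ===== PORT A =====
-- matrizCuad = lambda orden, filler=0: [[filler]*orden for i in range(orden)]
-- ([filler]*orden is [] for orden ≤ 0, which List.replicate orden.toNat matches exactly)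
def matrizCuad (orden : Int) (filler : Int) : List (List Int) :=
  (PySem.List.pyRange 0 orden 1).map (fun _ => List.replicate orden.toNat filler)

-- matriz[i][j] = v ; exact here: in trianInferiorInv both indices are nonnegative and in range
def pvSetIJ (m : List (List Int)) (i j : Int) (v : Int) : List (List Int) :=
  m.set i.toNat ((m.getD i.toNat []).set j.toNat v)

def trianInferiorInv (n : Int) : List (List Int) :=
  let matriz := matrizCuad n 0
  let st :=
    (PySem.List.pyRange 0 n 1).foldl
      (fun (st : List (List Int) × Int × Int) i =>
        let inner :=
          (PySem.List.pyRange (n - 1) (-1) (-1)).foldl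
            (fun (p : List (List Int) × Int) j =>
              if j ≥ st.2.2 then (pvSetIJ p.1 i j p.2, p.2 + 1) else p)
            (st.1, st.2.1)
        (inner.1, inner.2, st.2.2 - 1))
      (matriz, 1, n - 1)
  st.1

-- ===== PORT B =====
def trianInferiorInv_alt (n : Int) : List (List Int) :=
  (PySem.List.pyRange 0 n 1).map (fun i =>
    (PySem.List.pyRange 0 n 1).map (fun j =>
      if j ≥ n - 1 - i then PySem.Int.floordiv (i * (i + 1)) 2 + n - j else 0))

-- ===== PRECONDITION & SPEC =====
def Spec_trianInferiorInv (n : Int) (out : List (List Int)) : Prop := out = trianInferiorInv_alt n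
instance (n : Int) (out : List (List Int)) : Decidable (Spec_trianInferiorInv n out) := by unfold Spec_trianInferiorInv; infer_instance

-- ===== CLAIM (what is proved, stated in full; the proofs are below) =====
def Claim_equal_trianInferiorInv : Prop := ∀ (n : Int), Dom_trianInferiorInv n → Spec_trianInferiorInv n (trianInferiorInv n)

-- ===== LEMMAS AND PROOFS =====

-- row-level version of A's inner loop body
def pvRowFold (col : Int) (js : List Int) (r : List Int) (s : Int) : List Int × Int :=
  js.foldl (fun p j => if j ≥ col then (p.1.set j.toNat p.2, p.2 + 1) else p) (r, s)

-- the inner fold only touches row i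
theorem pv_inner_to_row (js : List Int) (m : List (List Int)) (i : Nat) (col s : Int)
    (him : i < m.length) :
    js.foldl (fun (p : List (List Int) × Int) j =>
        if j ≥ col then (pvSetIJ p.1 (i : Int) j p.2, p.2 + 1) else p) (m, s)
    = (m.set i (pvRowFold col js (m.getD i []) s).1, (pvRowFold col js (m.getD i []) s).2) := by
  induction js generalizing m s with
  | nil =>
    simp only [pvRowFold, List.foldl_nil]
    rw [List.getD_eq_getElem?_getD, List.getElem?_eq_getElem him]
    simp [List.set_getElem_self]
  | cons j js ih =>
    simp only [pvRowFold, List.foldl_cons]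
    by_cases hj : j ≥ col
    · rw [if_pos hj, if_pos hj, ih _ _ (by simp [pvSetIJ]; omega)]
      simp only [pvSetIJ, Int.toNat_natCast, pvRowFold]
      simp [List.getD_eq_getElem?_getD, him, List.set_set]
    · rw [if_neg hj, if_neg hj, ih _ _ him]
      rfl

-- final row i of A's matrix, in closed form
def pvRowFinal (n : Int) (i : Nat) : List Int :=
  (List.range n.toNat).map (fun (j : Nat) =>
    if n - 1 - (i : Int) ≤ (j : Int) then
      PySem.Int.floordiv ((i : Int) * ((i : Int) + 1)) 2 + n - (j : Int) else 0)

-- matrix after the first t outer iterations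
def pvMatPartial (n : Int) (t : Nat) : List (List Int) :=
  (List.range n.toNat).map (fun (i : Nat) =>
    if i < t then pvRowFinal n i else List.replicate n.toNat 0)

-- A's inner countdown loop, run over its first t values, on a zero row
theorem pv_rowFold_prefix (n : Int) (t : Nat) (ht : (t : Int) ≤ n)
    (col s : Int) (hcol : col ≤ n) :
    pvRowFold col ((List.range t).map (fun (k : Nat) => n - 1 - (k : Int)))
      (List.replicate n.toNat 0) s
    = ((List.range n.toNat).map (fun (j : Nat) =>
          if col ≤ (j : Int) ∧ n - (t : Int) ≤ (j : Int) then s + (n - 1 - (j : Int)) else 0),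
       s + min (t : Int) (n - col)) := by
  induction t with
  | zero =>
    simp only [List.range_zero, List.map_nil, pvRowFold, List.foldl_nil, Nat.cast_zero]
    refine Prod.ext ?_ ?_
    · apply List.ext_getElem (by simp)
      intro k h1 h2
      have hk : k < n.toNat := by simpa using h1
      simp only [List.getElem_replicate, List.getElem_map, List.getElem_range]
      rw [if_neg (by omega)]
    · show s = s + min 0 (n - col)
      omega
  | succ t ih =>
    have ht' : (t : Int) ≤ n := by push_cast at ht ⊢; omega
    rw [List.range_succ, List.map_append]
    simp only [pvRowFold, List.foldl_append, List.map_cons, List.map_nil,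
      List.foldl_cons, List.foldl_nil]
    rw [show ((List.range t).map (fun (k : Nat) => n - 1 - (k : Int))).foldl
        (fun p j => if j ≥ col then (p.1.set j.toNat p.2, p.2 + 1) else p)
        (List.replicate n.toNat 0, s) = _ from ih ht']
    by_cases hj : n - 1 - (t : Int) ≥ col
    · rw [if_pos hj]
      have hmin : min (t : Int) (n - col) = (t : Int) := by omega
      rw [hmin]
      refine Prod.ext ?_ ?_
      · apply List.ext_getElem (by simp)
        intro k h1 h2
        have hk : k < n.toNat := by simpa using h1
        simp only [List.getElem_set, List.getElem_map, List.getElem_range]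
        by_cases hkt : (n - 1 - (t : Int)).toNat = k
        · rw [if_pos hkt, if_pos (by omega)]
          omega
        · rw [if_neg hkt]
          by_cases hc : col ≤ (k : Int) ∧ n - ((t : Int) + 1) ≤ (k : Int)
          · rw [if_pos (by omega), if_pos (by omega)]
          · rw [if_neg (by omega), if_neg (by omega)]
      · show s + (t : Int) + 1 = s + min ((t : Nat) + 1 : Int) (n - col)
        omega
    · rw [if_neg hj]
      refine Prod.ext ?_ ?_
      · apply List.map_congr_left
        intro k hk
        have hkn : k < n.toNat := List.mem_range.mp hk
        by_cases hc : col ≤ (k : Int)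
        · rw [if_pos (by omega), if_pos (by omega)]
        · rw [if_neg (by omega), if_neg (by omega)]
      · show s + min (t : Int) (n - col) = s + min ((t : Nat) + 1 : Int) (n - col)
        omega

-- the outer fold after its first t iterations
theorem pv_outer_prefix (n : Int) (hn : 0 ≤ n) (t : Nat) (ht : (t : Int) ≤ n) :
    ((List.range t).map (fun (k : Nat) => (k : Int))).foldl
      (fun (st : List (List Int) × Int × Int) i =>
        let inner :=
          (PySem.List.pyRange (n - 1) (-1) (-1)).foldl
            (fun (p : List (List Int) × Int) j =>
              if j ≥ st.2.2 then (pvSetIJ p.1 i j p.2, p.2 + 1) else p)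
            (st.1, st.2.1)
        (inner.1, inner.2, st.2.2 - 1))
      (matrizCuad n 0, 1, n - 1)
    = (pvMatPartial n t, PySem.Int.floordiv ((t : Int) * ((t : Int) + 1)) 2 + 1,
       n - 1 - (t : Int)) := by
  induction t with
  | zero =>
    simp only [List.range_zero, List.map_nil, List.foldl_nil, Nat.cast_zero, Prod.mk.injEq]
    refine ⟨?_, ?_, ?_⟩
    · simp [matrizCuad, pvMatPartial, PySem.List.pyRange_one, List.map_map, Function.comp_def,
        List.map_const']
    · rw [PySem.Int.floordiv_eq_ediv_of_pos (by omega)]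
      norm_num
    · omega
  | succ t ih =>
    have ht' : (t : Int) ≤ n := by push_cast at ht ⊢; omega
    have htn : t < n.toNat := by omega
    rw [List.range_succ, List.map_append, List.foldl_append, ih ht']
    simp only [List.map_cons, List.map_nil, List.foldl_cons, List.foldl_nil]
    have hcd : PySem.List.pyRange (n - 1) (-1) (-1)
        = (List.range n.toNat).map (fun (k : Nat) => n - 1 - (k : Int)) := by
      rw [PySem.List.pyRange_neg_one]
      have h : (n - 1 - (-1)).toNat = n.toNat := by omega
      rw [h]
    rw [hcd,
      pv_inner_to_row ((List.range n.toNat).map (fun (k : Nat) => n - 1 - (k : Int)))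
        (pvMatPartial n t) t (n - 1 - (t : Int))
        (PySem.Int.floordiv ((t : Int) * ((t : Int) + 1)) 2 + 1)
        (by simp [pvMatPartial]; omega)]
    have hgetD : (pvMatPartial n t).getD t [] = List.replicate n.toNat 0 := by
      simp [pvMatPartial, List.getD_eq_getElem?_getD, htn]
    rw [hgetD, pv_rowFold_prefix n n.toNat (by omega) (n - 1 - (t : Int)) _ (by omega)]
    have hmin : min ((n.toNat : Int)) (n - (n - 1 - (t : Int))) = (t : Int) + 1 := by omega
    simp only [Prod.mk.injEq]
    refine ⟨?_, ?_, ?_⟩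
    · apply List.ext_getElem (by simp [pvMatPartial])
      intro k h1 h2
      simp only [pvMatPartial, List.getElem_set, List.getElem_map, List.getElem_range] at *
      have hk : k < n.toNat := by simpa [pvMatPartial] using h2
      by_cases hkt : t = k
      · subst hkt
        rw [if_pos rfl, if_pos (by omega), pvRowFinal]
        apply List.map_congr_left
        intro j hjm
        have hjn : j < n.toNat := List.mem_range.mp hjm
        generalize PySem.Int.floordiv ((t : Int) * ((t : Int) + 1)) 2 = d
        by_cases hc : n - 1 - (t : Int) ≤ (j : Int)
        · rw [if_pos (by constructor <;> omega), if_pos hc]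
          omega
        · rw [if_neg (by omega), if_neg hc]
      · rw [if_neg hkt]
        by_cases hlt : k < t
        · rw [if_pos hlt, if_pos (by omega)]
        · rw [if_neg hlt, if_neg (by omega)]
    · rw [hmin, PySem.Int.floordiv_eq_ediv_of_pos (by omega),
        PySem.Int.floordiv_eq_ediv_of_pos (by omega)]
      push_cast
      rw [show ((t : Int) + 1) * ((t : Int) + 1 + 1)
          = (t : Int) * ((t : Int) + 1) + ((t : Int) + 1) * 2 from by ring,
        Int.add_mul_ediv_right _ _ (by omega : (2 : Int) ≠ 0)]
      ring
    · push_cast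
      ring

-- ===== VERDICT (by name: the statement is the Claim_ definition above) =====
theorem trianInferiorInv_spec : Claim_equal_trianInferiorInv := by
  intro n _
  show trianInferiorInv n = trianInferiorInv_alt n
  by_cases hn : 0 ≤ n
  · have hrange : PySem.List.pyRange 0 n 1 = (List.range n.toNat).map (fun (k : Nat) => (k : Int)) := by
      rw [PySem.List.pyRange_one]
      have : (n - 0).toNat = n.toNat := by omega
      rw [this]
      apply List.map_congr_left; intro k _; ring
    have hNt : ((n.toNat : Int)) ≤ n := by omega
    unfold trianInferiorInv
    simp only [hrange]
    rw [pv_outer_prefix n hn n.toNat hNt]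
    unfold trianInferiorInv_alt
    simp only [hrange, List.map_map]
    unfold pvMatPartial
    apply List.map_congr_left
    intro i hi
    have hin : i < n.toNat := List.mem_range.mp hi
    rw [if_pos hin, pvRowFinal]
    apply List.map_congr_left
    intro j _
    simp only [Function.comp_apply, ge_iff_le]
  · have h1 : PySem.List.pyRange 0 n 1 = [] := PySem.List.pyRange_one_eq_nil (by omega)
    unfold trianInferiorInv trianInferiorInv_alt matrizCuad
    simp [h1]
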